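-- pv_equiv track=rewrite | github.com/jamestkpoon/advent-of-code | d24.py | get_list_of_tiles_to_flip
-- ===== SOURCE A (Python) =====
-- def navigate_hex_grid(sequence):
--     pos = [0, 0]
--     for step in sequence:
--         if step == "w":
--             pos[1] += 2
--         elif step == "e":
--             pos[1] -= 2
--         else:
--             if step[0] == "n":
--                 pos[0] += 1
--             else:
--                 pos[0] -= 1
--             if step[1] == "w":
--                 pos[1] += 1
--             else:
--                 pos[1] -= 1
--
--     return pos
--
-- def get_list_of_tiles_to_flip(sequences):
--     out = []
--     for s in sequences:
--         pos = navigate_hex_grid(s)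
--         if pos not in out:
--             out.append(pos)
--         else:
--             out.remove(pos)
--
--     return out
-- ===== SOURCE B (Python) =====
-- def get_list_of_tiles_to_flip(sequences):
--     positions = []
--     for s in sequences:
--         x = y = 0
--         for step in s:
--             if step == "w":
--                 y += 2
--             elif step == "e":
--                 y -= 2
--             else:
--                 x += 1 if step[0] == "n" else -1
--                 y += 1 if step[1] == "w" else -1
--         positions.append((x, y))
--
--     counts = {}
--     for p in positions:
--         counts[p] = counts.get(p, 0) + 1
--
--     result = []
--     seen = set()
--     for p in reversed(positions):
--         if p not in seen:
--             seen.add(p)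
--             if counts[p] % 2 == 1:
--                 result.append(p)
--     result.reverse()
--     return [[x, y] for (x, y) in result]
-- ===== Notes on version B (the rewrite author's own statement) =====
-- stated objective: alternative
-- what changed: Replaces A's incremental membership-toggling output list (a scan and a remove of the evolving result per sequence) by one counting pass over all final positions plus a reverse walk with a seen-set that keeps each odd-count position at its last occurrence.
import Mathlib
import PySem

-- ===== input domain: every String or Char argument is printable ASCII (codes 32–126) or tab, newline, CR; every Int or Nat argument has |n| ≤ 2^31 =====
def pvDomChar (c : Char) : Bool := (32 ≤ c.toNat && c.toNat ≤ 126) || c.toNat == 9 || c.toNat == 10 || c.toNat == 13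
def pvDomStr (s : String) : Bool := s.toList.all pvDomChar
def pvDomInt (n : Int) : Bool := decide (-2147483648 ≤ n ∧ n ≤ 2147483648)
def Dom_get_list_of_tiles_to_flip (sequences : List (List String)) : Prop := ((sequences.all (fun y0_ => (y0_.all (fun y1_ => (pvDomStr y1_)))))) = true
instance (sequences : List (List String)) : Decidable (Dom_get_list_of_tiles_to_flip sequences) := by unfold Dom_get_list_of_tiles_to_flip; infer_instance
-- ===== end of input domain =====

-- B replaces A's incremental membership-toggling output list by one counting pass (a dict of
-- position counts) plus a reverse last-occurrence selection pass with a seen-set (alternative algorithm).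

-- ===== PORT A =====
def pv_navigate_hex_grid (sequence : List String) : Int × Int :=
  sequence.foldl (fun pos step =>
    if step == "w" then (pos.1, pos.2 + 2)
    else if step == "e" then (pos.1, pos.2 - 2)
    else
      let p0 := if PySem.Str.pyGet? step 0 == some 'n' then pos.1 + 1 else pos.1 - 1
      let p1 := if PySem.Str.pyGet? step 1 == some 'w' then pos.2 + 1 else pos.2 - 1
      (p0, p1)) (0, 0)

def get_list_of_tiles_to_flip (sequences : List (List String)) : List (List Int) :=
  sequences.foldl (fun out s =>
    let p := pv_navigate_hex_grid s
    let pos := [p.1, p.2]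
    if out.contains pos then
      match PySem.List.remove? out pos with
      | some o => o
      | none => out
    else out ++ [pos]) []

-- ===== PORT B =====
def pv_nav_alt (sequence : List String) : Int × Int :=
  sequence.foldl (fun (xy : Int × Int) step =>
    if step == "w" then (xy.1, xy.2 + 2)
    else if step == "e" then (xy.1, xy.2 - 2)
    else (xy.1 + (if PySem.Str.pyGet? step 0 == some 'n' then 1 else -1),
          xy.2 + (if PySem.Str.pyGet? step 1 == some 'w' then 1 else -1))) (0, 0)

def get_list_of_tiles_to_flip_alt (sequences : List (List String)) : List (List Int) :=
  let positions := sequences.map pv_nav_alt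
  let counts : PySem.Dict (Int × Int) Int :=
    positions.foldl (fun d p => d.insert p (d.getD p 0 + 1)) PySem.Dict.empty
  let result := (positions.reverse.foldl
      (fun (st : PySem.Set (Int × Int) × List (Int × Int)) p =>
        if PySem.Set.contains st.1 p then st
        else (PySem.Set.add st.1 p,
              if PySem.Int.mod (counts.getD p 0) 2 == 1 then st.2 ++ [p] else st.2))
      (PySem.Set.empty, [])).2
  result.reverse.map (fun p => [p.1, p.2])

-- ===== PRECONDITION & SPEC =====
-- Pre_ excludes exactly the inputs on which the Python A raises IndexError: a step string that
-- is neither "w" nor "e" and is shorter than 2 characters (step[0] or step[1] fails).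
def Pre_get_list_of_tiles_to_flip (sequences : List (List String)) : Prop :=
  ∀ s ∈ sequences, ∀ st ∈ s, st = "w" ∨ st = "e" ∨ 2 ≤ PySem.Str.len st
instance (sequences : List (List String)) : Decidable (Pre_get_list_of_tiles_to_flip sequences) := by unfold Pre_get_list_of_tiles_to_flip; infer_instance

def pvWitness_get_list_of_tiles_to_flip : List (List String) := [["e", "nw"], ["w"], ["e", "nw"], ["se"]]

def Spec_get_list_of_tiles_to_flip (sequences : List (List String)) (out : List (List Int)) : Prop := out = get_list_of_tiles_to_flip_alt sequences
instance (sequences : List (List String)) (out : List (List Int)) : Decidable (Spec_get_list_of_tiles_to_flip sequences out) := by unfold Spec_get_list_of_tiles_to_flip; infer_instance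

-- ===== CLAIM (what is proved, stated in full; the proofs are below) =====
def Claim_equal_get_list_of_tiles_to_flip : Prop := ∀ (sequences : List (List String)), Dom_get_list_of_tiles_to_flip sequences → Pre_get_list_of_tiles_to_flip sequences → Spec_get_list_of_tiles_to_flip sequences (get_list_of_tiles_to_flip sequences)

-- ===== LEMMAS AND PROOFS =====

-- last-occurrence dedup: keeps each element at its LAST occurrence, in order
def ldedup {α : Type} [DecidableEq α] : List α → List α
  | [] => []
  | x :: l => if x ∈ l then ldedup l else x :: ldedup l

-- the common characterisation of both results
def Lsel {α : Type} [DecidableEq α] (ps : List α) : List α :=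
  (ldedup ps).filter (fun x => ps.count x % 2 == 1)

theorem mem_ldedup {α : Type} [DecidableEq α] {x : α} {l : List α} :
    x ∈ ldedup l ↔ x ∈ l := by
  induction l with
  | nil => simp [ldedup]
  | cons y l ih =>
    simp only [ldedup]
    split_ifs with h
    · simp only [List.mem_cons, ih]
      constructor
      · exact Or.inr
      · rintro (rfl | hx); exact h; exact hx
    · simp [ih]

theorem nodup_ldedup {α : Type} [DecidableEq α] (l : List α) : (ldedup l).Nodup := by
  induction l with
  | nil => simp [ldedup]
  | cons x l ih =>
    simp only [ldedup]
    split_ifs with h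
    · exact ih
    · exact List.Nodup.cons (by simpa [mem_ldedup] using h) ih

theorem ldedup_append_singleton {α : Type} [DecidableEq α] (l : List α) (p : α) :
    ldedup (l ++ [p]) = (ldedup l).filter (fun x => x ≠ p) ++ [p] := by
  induction l with
  | nil => simp [ldedup]
  | cons x l ih =>
    by_cases hxp : x = p
    · subst hxp
      have hx : x ∈ l ++ [x] := by simp
      simp only [List.cons_append, ldedup, if_pos hx, ih]
      split_ifs with h
      · rfl
      · simp [List.filter]
    · simp only [List.cons_append, ldedup, List.mem_append, List.mem_singleton, hxp, or_false]
      split_ifs with h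
      · exact ih
      · simp [List.filter, hxp, ih]

theorem ldedup_filter {α : Type} [DecidableEq α] (q : α → Bool) (l : List α) :
    ldedup (l.filter q) = (ldedup l).filter q := by
  induction l with
  | nil => simp [ldedup]
  | cons x l ih =>
    by_cases hq : q x
    · simp only [List.filter_cons, hq, if_pos, ldedup]
      by_cases hx : x ∈ l
      · rw [if_pos (by simp [List.mem_filter, hx, hq]), if_pos hx, ih]
      · rw [if_neg (by simp [List.mem_filter, hx]), if_neg hx, ih]
        simp [List.filter, hq]
    · simp only [List.filter_cons, hq, ldedup, Bool.false_eq_true, if_false]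
      rw [ih]
      by_cases hx : x ∈ l
      · rw [if_pos hx]
      · rw [if_neg hx]
        simp [List.filter, hq]

theorem mem_Lsel {α : Type} [DecidableEq α] {p : α} {l : List α} :
    p ∈ Lsel l ↔ l.count p % 2 = 1 := by
  constructor
  · intro h
    simp only [Lsel, List.mem_filter, beq_iff_eq] at h
    exact h.2
  · intro h
    have hm : p ∈ l := by
      by_contra hn
      rw [List.count_eq_zero_of_not_mem hn] at h
      omega
    simp [Lsel, List.mem_filter, mem_ldedup, hm, h]

theorem erase_beq_eq {α : Type} [DecidableEq α] (i : BEq α) [li : @LawfulBEq α i] (l : List α) (v : α) :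
    @List.erase α i l v = @List.erase α instBEqOfDecidableEq l v := by
  induction l with
  | nil => rfl
  | cons x l ih =>
    by_cases hxv : x = v
    · simp [List.erase_cons, hxv]
    · simp [List.erase_cons, hxv, ih]

-- A's toggle fold (generic)
def tfold {α : Type} [DecidableEq α] (ps : List α) : List α :=
  ps.foldl (fun out p => if p ∈ out then out.erase p else out ++ [p]) []

theorem Lsel_append_singleton {α : Type} [DecidableEq α] (qs : List α) (p : α) :
    Lsel (qs ++ [p]) = if p ∈ Lsel qs then (Lsel qs).erase p else Lsel qs ++ [p] := by
  have hnd : (Lsel qs).Nodup := (nodup_ldedup qs).filter _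
  have hfe : (Lsel qs).erase p = (Lsel qs).filter (fun x => x ≠ p) := by
    rw [hnd.erase_eq_filter]
    apply List.filter_congr
    intro x _
    by_cases h : x = p <;> simp [h]
  have hcp : (qs ++ [p]).count p = qs.count p + 1 := by
    simp [List.count_append]
  have hcount : ∀ x : α, x ≠ p → (qs ++ [p]).count x = qs.count x := by
    intro x hx
    have hpx : p ≠ x := Ne.symm hx
    simp [List.count_append, hpx]
  have hstep : Lsel (qs ++ [p]) =
      ((Lsel qs).filter (fun x => x ≠ p)) ++
        (if ((qs ++ [p]).count p % 2 == 1) then [p] else []) := by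
    unfold Lsel
    rw [ldedup_append_singleton, List.filter_append]
    congr 1
    · rw [List.filter_filter, List.filter_filter]
      apply List.filter_congr
      intro x hx
      by_cases hxp : x = p
      · simp [hxp]
      · simp [hxp, hcount x hxp]
    · simp only [List.filter_singleton]
      rw [hcp]
      cases h : ((qs.count p + 1) % 2 == 1) <;> simp [h]
  by_cases hp : qs.count p % 2 = 1
  · have hpm : p ∈ Lsel qs := mem_Lsel.2 hp
    rw [if_pos hpm, hstep, ← hfe]
    have : ((qs ++ [p]).count p % 2 == 1) = false := by
      rw [hcp]
      simp only [beq_eq_false_iff_ne, ne_eq]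
      omega
    rw [this]
    simp
  · have hpm : p ∉ Lsel qs := fun h => hp (mem_Lsel.1 h)
    rw [if_neg hpm, hstep]
    have h1 : (Lsel qs).filter (fun x => x ≠ p) = Lsel qs := by
      apply List.filter_eq_self.2
      intro x hx
      simp only [ne_eq, decide_eq_true_eq]
      rintro rfl; exact hpm hx
    have h2 : ((qs ++ [p]).count p % 2 == 1) = true := by
      rw [hcp]
      simp only [beq_iff_eq]
      omega
    rw [h1, h2]
    simp

theorem tfold_eq_Lsel {α : Type} [DecidableEq α] (ps : List α) : tfold ps = Lsel ps := by
  induction ps using List.reverseRecOn with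
  | nil => simp [tfold, Lsel, ldedup]
  | append_singleton qs p ih =>
    unfold tfold
    rw [List.foldl_append]
    simp only [List.foldl_cons, List.foldl_nil]
    rw [show (qs.foldl (fun out p => if p ∈ out then out.erase p else out ++ [p]) []) = tfold qs from rfl,
        ih, Lsel_append_singleton]

-- first-occurrence dedup of the remaining list, given already-seen elements
def fd {α : Type} [DecidableEq α] (s : List α) : List α → List α
  | [] => []
  | x :: r => if x ∈ s then fd s r else x :: fd (s ++ [x]) r

theorem fd_eq {α : Type} [DecidableEq α] (r s : List α) :
    fd s r = (ldedup ((r.filter (fun x => x ∉ s)).reverse)).reverse := by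
  induction r generalizing s with
  | nil => simp [fd, ldedup]
  | cons x r ih =>
    by_cases hx : x ∈ s
    · simp only [fd, List.filter_cons, hx]
      simp [ih]
    · simp only [fd, List.filter_cons, hx]
      simp only [not_false_eq_true, decide_true, if_pos, List.reverse_cons]
      rw [ldedup_append_singleton, List.reverse_append]
      simp only [List.reverse_singleton, List.singleton_append]
      rw [ih (s ++ [x])]
      have hflt : r.filter (fun y => decide (y ∉ s ++ [x])) =
          (r.filter (fun y => decide (y ∉ s))).filter (fun y => y ≠ x) := by
        rw [List.filter_filter]
        apply List.filter_congr
        intro y _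
        by_cases hyx : y = x <;> by_cases hys : y ∈ s <;> simp [hyx, hys]
      rw [hflt, ← List.filter_reverse, ldedup_filter]
      simp

-- B's selection loop, with general seen-set and accumulator
theorem loopB_eq {α : Type} [DecidableEq α] [BEq α] [LawfulBEq α] (pred : α → Bool)
    (r : List α) (s : PySem.Set α) (acc : List α) :
    (r.foldl (fun (st : PySem.Set α × List α) p =>
        if PySem.Set.contains st.1 p then st
        else (PySem.Set.add st.1 p, if pred p then st.2 ++ [p] else st.2))
      (s, acc)).2 = acc ++ (fd s r).filter pred := by
  induction r generalizing s acc with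
  | nil => simp [fd]
  | cons x r ih =>
    simp only [List.foldl_cons, fd]
    by_cases hx : x ∈ s
    · rw [if_pos (by simpa [PySem.Set.contains] using hx), if_pos hx, ih]
    · rw [if_neg (by simpa [PySem.Set.contains] using hx), if_neg hx,
          PySem.Set.add_of_not_mem hx]
      by_cases hp : pred x
      · rw [if_pos hp, ih]
        simp [hp]
      · rw [if_neg (by simp [hp]), ih]
        simp [hp]

theorem int_mod_count {α : Type} [DecidableEq α] (l : List α) (p : α) :
    (PySem.Int.mod ((0 : Int) + (l.count p : Int)) 2 == 1) = (l.count p % 2 == 1) := by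
  simp only [zero_add]
  have : PySem.Int.mod ((l.count p : Int)) 2 = ((l.count p % 2 : Nat) : Int) := by
    simp only [PySem.Int.mod, Int.fmod_eq_emod]
    omega
  rw [this]
  by_cases h : l.count p % 2 = 1 <;> simp [h] <;> omega

theorem count_beq_prod (p : Int × Int) (ps : List (Int × Int)) :
    @List.count (Int × Int) instBEqProd p ps = @List.count (Int × Int) instBEqOfDecidableEq p ps := by
  induction ps with
  | nil => rfl
  | cons x l ih => simp [List.count_cons, ih]

theorem map_inj_Lsel {α β : Type} [DecidableEq α] [DecidableEq β] (f : α → β)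
    (hf : Function.Injective f) (ps : List α) :
    Lsel (ps.map f) = (Lsel ps).map f := by
  have hld : ∀ l : List α, ldedup (l.map f) = (ldedup l).map f := by
    intro l
    induction l with
    | nil => simp [ldedup]
    | cons x l ih =>
      simp only [List.map_cons, ldedup]
      simp only [List.mem_map_of_injective hf]
      split_ifs with h
      · exact ih
      · simp [ih]
  unfold Lsel
  rw [hld, List.filter_map]
  congr 1
  apply List.filter_congr
  intro x _
  simp [Function.comp, List.count_map_of_injective _ f hf]

theorem nav_eq (s : List String) : pv_navigate_hex_grid s = pv_nav_alt s := by
  unfold pv_navigate_hex_grid pv_nav_alt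
  congr 1
  funext pos step
  split_ifs <;> simp <;> omega

theorem pair_to_list_inj : Function.Injective (fun p : Int × Int => [p.1, p.2]) := by
  intro a b h
  simp only [List.cons.injEq, and_true] at h
  exact Prod.ext h.1 h.2

theorem a_eq_tfold (sequences : List (List String)) :
    get_list_of_tiles_to_flip sequences
      = tfold ((sequences.map pv_nav_alt).map (fun p : Int × Int => [p.1, p.2])) := by
  unfold get_list_of_tiles_to_flip tfold
  rw [List.foldl_map, List.foldl_map]
  congr 1
  funext out s
  dsimp only
  rw [nav_eq]
  by_cases h : [(pv_nav_alt s).1, (pv_nav_alt s).2] ∈ out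
  · rw [if_pos (show out.contains _ = true by simpa using h), if_pos h,
        PySem.List.remove?_eq_some_erase out _ h]
    simp only []
    exact erase_beq_eq _ out _
  · rw [if_neg (show ¬ out.contains _ = true by simpa using h), if_neg h]

theorem b_eq_Lsel (sequences : List (List String)) :
    get_list_of_tiles_to_flip_alt sequences
      = (Lsel (sequences.map pv_nav_alt)).map (fun p : Int × Int => [p.1, p.2]) := by
  unfold get_list_of_tiles_to_flip_alt
  set ps := sequences.map pv_nav_alt with hps
  simp only []
  rw [loopB_eq]
  simp only [List.nil_append]
  have hpred : ∀ p : Int × Int,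
      (PySem.Int.mod ((ps.foldl (fun d p => d.insert p (d.getD p 0 + 1)) PySem.Dict.empty).getD p 0) 2 == 1)
        = (@List.count (Int × Int) instBEqOfDecidableEq p ps % 2 == 1) := by
    intro p
    rw [PySem.Dict.getD_foldl_insert_add_one]
    have : (PySem.Dict.empty : PySem.Dict (Int × Int) Int).getD p 0 = 0 := by rfl
    rw [this, count_beq_prod]
    exact int_mod_count ps p
  rw [List.filter_congr (fun x _ => hpred x)]
  rw [fd_eq]
  simp only [PySem.Set.empty, List.not_mem_nil, not_false_eq_true, decide_true,
    List.filter_true, List.reverse_reverse, ← List.filter_reverse, Lsel]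

-- ===== VERDICT (by name: the statement is the Claim_ definition above) =====
theorem get_list_of_tiles_to_flip_spec : Claim_equal_get_list_of_tiles_to_flip := by
  intro sequences _ _
  unfold Spec_get_list_of_tiles_to_flip
  rw [a_eq_tfold, b_eq_Lsel, tfold_eq_Lsel,
      map_inj_Lsel (fun p : Int × Int => [p.1, p.2]) pair_to_list_inj]
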